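-- pv_equiv track=rewrite | github.com/Leona-24/leona | import csv.py | moving_average_forecast
-- ===== SOURCE A (Python) =====
-- def moving_average_forecast(data, window_size, forecast_days):
--     forecasts = []
--     temp_data = data.copy()
--     for i in range(forecast_days):
--         window = temp_data[-window_size:]
--         avg = sum(window) // window_size
--         forecasts.append(avg)
--         temp_data.append(avg)  # Add to temp list for rolling forecast
--     return forecasts
-- ===== SOURCE B (Python) =====
-- def moving_average_forecast(data, window_size, forecast_days):
--     # sliding-window sum: keep the current window and its running sum,
--     # subtract the element that leaves instead of re-summing each step
--     win = data[-window_size:]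
--     s = sum(win)
--     head = 0
--     out = []
--     for _ in range(forecast_days):
--         avg = s // window_size
--         out.append(avg)
--         win.append(avg)
--         s += avg
--         if len(win) - head > window_size:
--             s -= win[head]
--             head += 1
--     return out
-- ===== Notes on version B (the rewrite author's own statement) =====
-- stated objective: faster
-- what changed: B maintains the rolling window and its running sum incrementally (add the new forecast, subtract the element that leaves) instead of re-slicing and re-summing the last window_size elements every iteration.
-- outside the precondition, e.g. on moving_average_forecast([1, 2, 3], -2, 2): A returns [-2, -1], B returns [-2, 1]; on moving_average_forecast([1], 0, 1): A raises ZeroDivisionError, B raises ZeroDivisionError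
import Mathlib
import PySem

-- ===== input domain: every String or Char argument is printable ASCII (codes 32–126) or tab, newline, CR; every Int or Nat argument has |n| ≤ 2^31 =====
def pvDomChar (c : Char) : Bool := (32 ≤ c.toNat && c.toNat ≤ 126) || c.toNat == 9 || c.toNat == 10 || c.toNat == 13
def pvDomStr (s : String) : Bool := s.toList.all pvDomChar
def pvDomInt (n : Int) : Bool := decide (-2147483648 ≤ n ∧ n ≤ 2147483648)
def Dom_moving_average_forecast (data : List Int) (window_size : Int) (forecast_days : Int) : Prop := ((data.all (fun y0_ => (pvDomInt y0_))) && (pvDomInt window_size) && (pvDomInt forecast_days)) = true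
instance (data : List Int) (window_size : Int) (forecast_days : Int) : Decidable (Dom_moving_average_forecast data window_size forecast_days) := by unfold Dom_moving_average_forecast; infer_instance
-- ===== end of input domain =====

-- B replaces A's per-iteration slice-and-resum of the last window_size elements by an
-- incrementally maintained window sum (add the new forecast, subtract the leaving element):
-- objective faster, O(forecast_days + window_size) instead of O(forecast_days * window_size).

-- ===== PORT A =====
-- one iteration of A's loop body; state = (forecasts, temp_data)
def pvStepA (window_size : Int) (st : List Int × List Int) : List Int × List Int :=
  let window := PySem.List.slice st.2 (some (-window_size)) none
  let avg := PySem.Int.floordiv window.sum window_size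
  (st.1 ++ [avg], st.2 ++ [avg])

def moving_average_forecast (data : List Int) (window_size : Int) (forecast_days : Int) : List Int :=
  ((PySem.List.pyRange 0 forecast_days 1).foldl
    (fun st _ => pvStepA window_size st) ([], data)).1

-- ===== PORT B =====
-- one iteration of B's loop body; state = (out, win, s, head)
def pvStepB (window_size : Int) (st : List Int × List Int × Int × Int) : List Int × List Int × Int × Int :=
  let avg := PySem.Int.floordiv st.2.2.1 window_size
  let out := st.1 ++ [avg]
  let win := st.2.1 ++ [avg]
  let s := st.2.2.1 + avg
  let head := st.2.2.2
  if (win.length : Int) - head > window_size then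
    -- win[head]: under Pre_ (window_size ≥ 1) head is always in range when this branch runs
    (out, win, s - (PySem.List.pyGet? win head).getD 0, head + 1)
  else
    (out, win, s, head)

def moving_average_forecast_alt (data : List Int) (window_size : Int) (forecast_days : Int) : List Int :=
  let win := PySem.List.slice data (some (-window_size)) none
  ((PySem.List.pyRange 0 forecast_days 1).foldl
    (fun st _ => pvStepB window_size st) ([], win, win.sum, 0)).1

-- ===== PRECONDITION & SPEC =====
-- Pre_ restricts to the natural domain: window_size ≥ 1, or a non-positive forecast_days
-- (no iteration ever runs, both return []).  Excluded: window_size = 0 with forecast_days ≥ 1,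
-- where A raises ZeroDivisionError, and negative window_size with forecast_days ≥ 1, where A's
-- value (a slice from index -window_size floor-divided by the negative count) is an artefact
-- of Python slicing, not a moving average.
def Pre_moving_average_forecast (data : List Int) (window_size : Int) (forecast_days : Int) : Prop := 1 ≤ window_size ∨ forecast_days ≤ 0
instance (data : List Int) (window_size : Int) (forecast_days : Int) : Decidable (Pre_moving_average_forecast data window_size forecast_days) := by unfold Pre_moving_average_forecast; infer_instance
def pvWitness_moving_average_forecast : List Int × Int × Int := ([3, 5, 9], 2, 4)

def Spec_moving_average_forecast (data : List Int) (window_size : Int) (forecast_days : Int) (out : List Int) : Prop := out = moving_average_forecast_alt data window_size forecast_days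
instance (data : List Int) (window_size : Int) (forecast_days : Int) (out : List Int) : Decidable (Spec_moving_average_forecast data window_size forecast_days out) := by unfold Spec_moving_average_forecast; infer_instance

-- ===== CLAIM (what is proved, stated in full; the proofs are below) =====
def Claim_equal_moving_average_forecast : Prop := ∀ (data : List Int) (window_size : Int) (forecast_days : Int), Dom_moving_average_forecast data window_size forecast_days → Pre_moving_average_forecast data window_size forecast_days → Spec_moving_average_forecast data window_size forecast_days (moving_average_forecast data window_size forecast_days)

-- ===== LEMMAS AND PROOFS =====

-- A's slice temp[-window_size:] for window_size ≥ 1 is a drop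
lemma pv_slice_neg (xs : List Int) (ws : Int) (hws : 1 ≤ ws) :
    PySem.List.slice xs (some (-ws)) none = xs.drop (xs.length - ws.toNat) := by
  have h : -ws = -((ws.toNat : Nat) : Int) := by omega
  rw [h, PySem.List.slice_from_neg_natCast _ _ (by omega)]

-- main invariant: from related states the two folds produce the same output list
lemma pv_fold_eq (ws : Int) (hws : 1 ≤ ws) (l : List Int) :
    ∀ (fa : List Int) (temp win : List Int) (s head : Int) (h : Nat),
      head = (h : Int) → h ≤ win.length →
      win.drop h = temp.drop (temp.length - ws.toNat) →
      s = (win.drop h).sum →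
      (l.foldl (fun st _ => pvStepA ws st) (fa, temp)).1
        = (l.foldl (fun st _ => pvStepB ws st) (fa, win, s, head)).1 := by
  induction l with
  | nil => intro fa temp win s head h _ _ _ _; rfl
  | cons x xs ih =>
    intro fa temp win s head h hh hle hwin hs
    set w := ws.toNat with hw
    have hw1 : 1 ≤ w := by omega
    have hwlen : win.length - h = min w temp.length := by
      have := congrArg List.length hwin
      simp at this
      omega
    simp only [List.foldl_cons]
    have hsum : (PySem.List.slice temp (some (-ws)) none).sum = s := by
      rw [pv_slice_neg temp ws hws, ← hwin, hs]
    have hstepA : pvStepA ws (fa, temp)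
        = (fa ++ [PySem.Int.floordiv s ws], temp ++ [PySem.Int.floordiv s ws]) := by
      simp only [pvStepA, hsum]
    rw [hstepA]
    simp only [pvStepB]
    split_ifs with hc
    · -- window is full: an element leaves at the left
      simp only [List.length_append, List.length_cons, List.length_nil, hh] at hc
      push_cast at hc
      have hhlt : h < win.length := by omega
      have hfull : win.length - h = w := by omega
      have htlen : w ≤ temp.length := by omega
      have hget : (PySem.List.pyGet? (win ++ [PySem.Int.floordiv s ws]) head).getD 0
          = win[h] := by
        rw [hh, PySem.List.pyGet?_natCast,
            List.getElem?_append_left (by omega : h < win.length),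
            List.getElem?_eq_getElem hhlt]
        rfl
      rw [hget]
      have hdropcons : win.drop h = win[h] :: win.drop (h + 1) :=
        List.drop_eq_getElem_cons hhlt
      refine ih _ _ _ _ _ (h + 1) (by push_cast [hh]; ring)
        (by simp only [List.length_append, List.length_cons, List.length_nil]; omega) ?_ ?_
      · have h1 : (win ++ [PySem.Int.floordiv s ws]).drop (h + 1)
            = win.drop (h + 1) ++ [PySem.Int.floordiv s ws] := by
          rw [List.drop_append_of_le_length (by omega)]
        have h2 : (temp ++ [PySem.Int.floordiv s ws]).drop
              ((temp ++ [PySem.Int.floordiv s ws]).length - w)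
            = temp.drop (temp.length + 1 - w) ++ [PySem.Int.floordiv s ws] := by
          simp only [List.length_append, List.length_cons, List.length_nil]
          rw [List.drop_append_of_le_length (by omega)]
        have h3 : temp.drop (temp.length + 1 - w) = (temp.drop (temp.length - w)).tail := by
          rw [List.tail_drop]
          congr 1
          omega
        rw [h1, h2, h3, ← hwin, hdropcons]
        rfl
      · rw [List.drop_append_of_le_length (by omega)]
        have h4 := congrArg List.sum hdropcons
        simp only [List.sum_cons] at h4
        simp only [List.sum_append, List.sum_cons, List.sum_nil]
        omega
    · -- window still short: nothing leaves
      simp only [List.length_append, List.length_cons, List.length_nil, hh] at hc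
      push_cast at hc
      have htlen : temp.length < w := by omega
      have h0 : temp.length - w = 0 := by omega
      rw [h0] at hwin
      simp only [List.drop_zero] at hwin
      refine ih _ _ _ _ _ h hh
        (by simp only [List.length_append, List.length_cons, List.length_nil]; omega) ?_ ?_
      · have h2 : (temp ++ [PySem.Int.floordiv s ws]).length - w = 0 := by simp; omega
        rw [h2, List.drop_zero, List.drop_append_of_le_length (by omega), hwin]
      · rw [List.drop_append_of_le_length (by omega)]
        simp [hs]

-- ===== VERDICT (by name: the statement is the Claim_ definition above) =====
theorem moving_average_forecast_spec : Claim_equal_moving_average_forecast := by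
  intro data ws fd _ hpre
  unfold Spec_moving_average_forecast moving_average_forecast moving_average_forecast_alt
  by_cases hws : 1 ≤ ws
  · exact pv_fold_eq ws hws _ [] data _ _ 0 0 rfl (by simp)
      (by rw [pv_slice_neg data ws hws]; simp) rfl
  · -- then forecast_days ≤ 0: the loop body never runs and both sides are []
    have hfd : fd ≤ 0 := hpre.resolve_left hws
    have hr : PySem.List.pyRange 0 fd 1 = [] := by
      rw [PySem.List.pyRange_one]
      have h0 : (fd - 0).toNat = 0 := by omega
      rw [h0]
      rfl
    rw [hr]
    rfl
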